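-- pv_equiv track=rewrite | github.com/madmarks/PhD-Thesis-codes | Chapter_3/RM49_Discoverer_2-parts__Generate_input_files__from__class-rm48h-all-txt.py | calc_truth_table__7_vars__abc
-- ===== SOURCE A (Python) =====
-- def calc_truth_table__7_vars__abc(terms):
--     a = x1 = 0b00000000000000000000000000000000000000000000000000000000000000001111111111111111111111111111111111111111111111111111111111111111
--     b = x2 = 0b00000000000000000000000000000000111111111111111111111111111111110000000000000000000000000000000011111111111111111111111111111111
--     c = x3 = 0b00000000000000001111111111111111000000000000000011111111111111110000000000000000111111111111111100000000000000001111111111111111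
--     d = x4 = 0b00000000111111110000000011111111000000001111111100000000111111110000000011111111000000001111111100000000111111110000000011111111
--     e = x5 = 0b00001111000011110000111100001111000011110000111100001111000011110000111100001111000011110000111100001111000011110000111100001111
--     f = x6 = 0b00110011001100110011001100110011001100110011001100110011001100110011001100110011001100110011001100110011001100110011001100110011
--     g = x7 = 0b01010101010101010101010101010101010101010101010101010101010101010101010101010101010101010101010101010101010101010101010101010101
--
--     zero   = 0b00000000000000000000000000000000000000000000000000000000000000000000000000000000000000000000000000000000000000000000000000000000
--     one    = 0b11111111111111111111111111111111111111111111111111111111111111111111111111111111111111111111111111111111111111111111111111111111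
--     cw     = 0
--     for i in range(0, len(terms)):
--         term = terms[i]
--         if len(term) == 0:
--             continue                         # raise Exception("Empty term!")
--         elif len(term) == 1 and term == '0':
--             cw ^= zero
--         elif len(term) == 1 and term == '1':
--             cw ^= one
--         else:
--             t = one
--             for j in range(0, len(term)):
--                 if term[j] == 'a':   t &= a
--                 elif term[j] == 'b': t &= b
--                 elif term[j] == 'c': t &= c
--                 elif term[j] == 'd': t &= d
--                 elif term[j] == 'e': t &= e
--                 elif term[j] == 'f': t &= f
--                 elif term[j] == 'g': t &= g
--                 else: raise Exception("Only a,b,c,d,e,f,g are allowed!")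
--             cw ^= t
--     return cw
-- ===== SOURCE B (Python) =====
-- def calc_truth_table__7_vars__abc(terms):
--     # Per-bit-position recomputation: position p encodes a 7-variable assignment
--     # (variable k has value ((p >> (6-k)) & 1) ^ 1); the output bit at p is the
--     # XOR over terms of the term's value under that assignment.
--     cw = 0
--     for p in range(128):
--         bit = 0
--         for term in terms:
--             if len(term) == 0:
--                 continue
--             if term == '0':
--                 v = 0
--             elif term == '1':
--                 v = 1
--             else:
--                 v = 1
--                 for ch in term:
--                     k = ord(ch) - ord('a')
--                     if 0 <= k <= 6:
--                         v &= ((p >> (6 - k)) & 1) ^ 1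
--                     else:
--                         raise Exception("Only a,b,c,d,e,f,g are allowed!")
--             bit ^= v
--         cw |= bit << p
--     return cw
-- ===== Notes on version B (the rewrite author's own statement) =====
-- stated objective: alternative
-- what changed: B discards the seven hard-coded 128-bit mask constants and instead loops over the 128 output bit positions, computing each output bit as the XOR over terms of the term's value under that position's variable assignment (variable k at position p is ((p>>(6-k))&1)^1), assembling the result bit by bit; A XORs/ANDs whole 128-bit masks per term.
import Mathlib
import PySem

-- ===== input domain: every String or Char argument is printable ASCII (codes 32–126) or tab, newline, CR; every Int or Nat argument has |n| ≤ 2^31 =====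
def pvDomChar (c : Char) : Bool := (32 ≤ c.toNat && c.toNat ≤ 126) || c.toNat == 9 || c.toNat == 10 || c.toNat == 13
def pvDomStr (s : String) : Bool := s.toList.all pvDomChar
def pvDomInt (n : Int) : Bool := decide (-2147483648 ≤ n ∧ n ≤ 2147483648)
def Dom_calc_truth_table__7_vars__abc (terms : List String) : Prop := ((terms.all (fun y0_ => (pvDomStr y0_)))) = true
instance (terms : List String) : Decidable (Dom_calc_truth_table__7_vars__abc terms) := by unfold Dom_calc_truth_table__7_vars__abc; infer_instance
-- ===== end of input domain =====

-- B recomputes the truth table per output bit position from the position's bits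
-- (no 128-bit mask constants), instead of XOR/AND-ing whole 128-bit masks; objective: alternative.

-- ===== PORT A =====
def pvMaskA : Nat := 0b00000000000000000000000000000000000000000000000000000000000000001111111111111111111111111111111111111111111111111111111111111111
def pvMaskB : Nat := 0b00000000000000000000000000000000111111111111111111111111111111110000000000000000000000000000000011111111111111111111111111111111
def pvMaskC : Nat := 0b00000000000000001111111111111111000000000000000011111111111111110000000000000000111111111111111100000000000000001111111111111111
def pvMaskD : Nat := 0b00000000111111110000000011111111000000001111111100000000111111110000000011111111000000001111111100000000111111110000000011111111
def pvMaskE : Nat := 0b00001111000011110000111100001111000011110000111100001111000011110000111100001111000011110000111100001111000011110000111100001111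
def pvMaskF : Nat := 0b00110011001100110011001100110011001100110011001100110011001100110011001100110011001100110011001100110011001100110011001100110011
def pvMaskG : Nat := 0b01010101010101010101010101010101010101010101010101010101010101010101010101010101010101010101010101010101010101010101010101010101
def pvOneC : Nat := 0b11111111111111111111111111111111111111111111111111111111111111111111111111111111111111111111111111111111111111111111111111111111
def pvZeroC : Nat := 0b0

-- one character of A's inner AND loop; 'none' models the raised Exception
def pvTermAccA (acc : Option Nat) (ch : Char) : Option Nat :=
  match acc with
  | none => none
  | some t =>
    if ch = 'a' then some (t &&& pvMaskA)
    else if ch = 'b' then some (t &&& pvMaskB)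
    else if ch = 'c' then some (t &&& pvMaskC)
    else if ch = 'd' then some (t &&& pvMaskD)
    else if ch = 'e' then some (t &&& pvMaskE)
    else if ch = 'f' then some (t &&& pvMaskF)
    else if ch = 'g' then some (t &&& pvMaskG)
    else none

def pvTermValA (s : List Char) : Option Nat := s.foldl pvTermAccA (some pvOneC)

-- one iteration of A's outer loop (on excluded raising inputs the 'none' branch keeps cw)
def pvStepA (cw : Nat) (term : String) : Nat :=
  if term.toList.length = 0 then cw
  else if term.toList.length = 1 ∧ term.toList = ['0'] then cw ^^^ pvZeroC
  else if term.toList.length = 1 ∧ term.toList = ['1'] then cw ^^^ pvOneC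
  else match pvTermValA term.toList with
       | some t => cw ^^^ t
       | none => cw

def calc_truth_table__7_vars__abc (terms : List String) : Int :=
  ((terms.foldl pvStepA 0 : Nat) : Int)

-- ===== PORT B =====
-- value of one variable literal at output position p; 'none' models the raised Exception
def pvCharValB (p : Nat) (ch : Char) : Option Nat :=
  let k := ch.toNat - 97
  if 97 ≤ ch.toNat ∧ ch.toNat ≤ 103 then some (((p >>> (6 - k)) &&& 1) ^^^ 1) else none

def pvTermAccB (p : Nat) (acc : Option Nat) (ch : Char) : Option Nat :=
  match acc with
  | none => none
  | some v =>
    match pvCharValB p ch with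
    | some w => some (v &&& w)
    | none => none

def pvTermValB (p : Nat) (s : List Char) : Option Nat := s.foldl (pvTermAccB p) (some 1)

-- one term's contribution to the output bit at position p
def pvBitStepB (p : Nat) (bit : Nat) (term : String) : Nat :=
  if term.toList.length = 0 then bit
  else if term.toList = ['0'] then bit ^^^ 0
  else if term.toList = ['1'] then bit ^^^ 1
  else match pvTermValB p term.toList with
       | some v => bit ^^^ v
       | none => bit

def pvBitB (terms : List String) (p : Nat) : Nat := terms.foldl (pvBitStepB p) 0

def calc_truth_table__7_vars__abc_alt (terms : List String) : Int :=
  (((List.range 128).foldl (fun cw p => cw ||| (pvBitB terms p <<< p)) 0 : Nat) : Int)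

-- ===== PRECONDITION & SPEC =====
-- Pre_ excludes exactly the inputs on which A raises Exception: a term that is not
-- "0"/"1" and contains a character outside 'a'..'g' (including "0"/"1" inside longer terms).
def Pre_calc_truth_table__7_vars__abc (terms : List String) : Prop :=
  (terms.all fun term => term == "0" || term == "1" ||
     term.toList.all fun ch => 97 ≤ ch.toNat && ch.toNat ≤ 103) = true
instance (terms : List String) : Decidable (Pre_calc_truth_table__7_vars__abc terms) := by
  unfold Pre_calc_truth_table__7_vars__abc; infer_instance

def pvWitness_calc_truth_table__7_vars__abc : List String := ["abc", "1", "", "dg", "0", "a"]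

def Spec_calc_truth_table__7_vars__abc (terms : List String) (out : Int) : Prop := out = calc_truth_table__7_vars__abc_alt terms
instance (terms : List String) (out : Int) : Decidable (Spec_calc_truth_table__7_vars__abc terms out) := by unfold Spec_calc_truth_table__7_vars__abc; infer_instance

-- ===== CLAIM (what is proved, stated in full; the proofs are below) =====
def Claim_equal_calc_truth_table__7_vars__abc : Prop := ∀ (terms : List String), Dom_calc_truth_table__7_vars__abc terms → Pre_calc_truth_table__7_vars__abc terms → Spec_calc_truth_table__7_vars__abc terms (calc_truth_table__7_vars__abc terms)

-- ===== LEMMAS AND PROOFS =====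

-- A's mask for the k-th variable (proof bookkeeping only)
def pvMaskOf (k : Nat) : Nat :=
  if k = 0 then pvMaskA else if k = 1 then pvMaskB else if k = 2 then pvMaskC
  else if k = 3 then pvMaskD else if k = 4 then pvMaskE else if k = 5 then pvMaskF
  else pvMaskG

theorem pvMaskOf_testBit : ∀ (k : Fin 7) (p : Fin 128),
    (pvMaskOf k.val).testBit p.val = ((((p.val >>> (6 - k.val)) &&& 1) ^^^ 1) == 1) := by
  decide

theorem pvOneC_testBit : ∀ p : Fin 128, pvOneC.testBit p.val = true := by decide

theorem pvChar_toNat_inj {c d : Char} (h : c.toNat = d.toNat) : c = d := by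
  apply Char.ext
  apply UInt32.toBitVec_inj.mp
  apply BitVec.eq_of_toNat_eq
  exact h

theorem pvChar_cases (ch : Char) (h1 : 97 ≤ ch.toNat) (h2 : ch.toNat ≤ 103) :
    ch = 'a' ∨ ch = 'b' ∨ ch = 'c' ∨ ch = 'd' ∨ ch = 'e' ∨ ch = 'f' ∨ ch = 'g' := by
  interval_cases h : ch.toNat <;>
    [exact Or.inl (pvChar_toNat_inj h);
     exact Or.inr (Or.inl (pvChar_toNat_inj h));
     exact Or.inr (Or.inr (Or.inl (pvChar_toNat_inj h)));
     exact Or.inr (Or.inr (Or.inr (Or.inl (pvChar_toNat_inj h))));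
     exact Or.inr (Or.inr (Or.inr (Or.inr (Or.inl (pvChar_toNat_inj h)))));
     exact Or.inr (Or.inr (Or.inr (Or.inr (Or.inr (Or.inl (pvChar_toNat_inj h))))));
     exact Or.inr (Or.inr (Or.inr (Or.inr (Or.inr (Or.inr (pvChar_toNat_inj h))))))]

theorem pvStepA_big (term : String) (cw : Nat)
    (h0 : ¬ term.toList.length = 0) (hz : ¬ term.toList = ['0']) (ho : ¬ term.toList = ['1'])
    {tA : Nat} (hA : pvTermValA term.toList = some tA) :
    pvStepA cw term = cw ^^^ tA := by
  simp only [pvStepA, hA]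
  rw [if_neg h0, if_neg (fun h => hz h.2), if_neg (fun h => ho h.2)]

theorem pvBitStepB_big (p : Nat) (term : String) (bit : Nat)
    (h0 : ¬ term.toList.length = 0) (hz : ¬ term.toList = ['0']) (ho : ¬ term.toList = ['1'])
    {tB : Nat} (hB : pvTermValB p term.toList = some tB) :
    pvBitStepB p bit term = bit ^^^ tB := by
  simp only [pvBitStepB, hB]
  rw [if_neg h0, if_neg hz, if_neg ho]

theorem pv_xor_le_one {x y : Nat} (hx : x ≤ 1) (hy : y ≤ 1) : x ^^^ y ≤ 1 := by
  interval_cases x <;> interval_cases y <;> decide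

theorem pv_and_eq_one {x y : Nat} (hx : x ≤ 1) (hy : y ≤ 1) :
    ((x &&& y) == 1) = ((x == 1) && (y == 1)) := by
  interval_cases x <;> interval_cases y <;> decide

theorem pv_xor_testbit {cw t : Nat} {bit v : Nat} {p : Nat}
    (hb : bit ≤ 1) (hv : v ≤ 1)
    (h1 : cw.testBit p = (bit == 1)) (h2 : t.testBit p = (v == 1)) :
    (cw ^^^ t).testBit p = ((bit ^^^ v) == 1) := by
  rw [Nat.testBit_xor, h1, h2]
  interval_cases bit <;> interval_cases v <;> decide

-- inner loop relation: A's AND of masks vs B's AND of position-p literal values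
theorem pvTerm_rel (p : Nat) (hp : p < 128) :
    ∀ (s : List Char), (∀ ch ∈ s, 97 ≤ ch.toNat ∧ ch.toNat ≤ 103) →
    ∀ (t w : Nat), t < 2 ^ 128 → w ≤ 1 → t.testBit p = (w == 1) →
    ∃ tA tB, s.foldl pvTermAccA (some t) = some tA ∧
             s.foldl (pvTermAccB p) (some w) = some tB ∧
             tA < 2 ^ 128 ∧ tB ≤ 1 ∧ tA.testBit p = (tB == 1) := by
  intro s
  induction s with
  | nil => intro _ t w ht hw hrel; exact ⟨t, w, rfl, rfl, ht, hw, hrel⟩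
  | cons ch rest ih =>
    intro hall t w ht hw hrel
    obtain ⟨hc1, hc2⟩ := hall ch (List.mem_cons_self ..)
    have hk : ch.toNat - 97 < 7 := by omega
    have hmask : pvTermAccA (some t) ch = some (t &&& pvMaskOf (ch.toNat - 97)) := by
      rcases pvChar_cases ch hc1 hc2 with h|h|h|h|h|h|h <;> subst h <;> rfl
    have hcv : pvCharValB p ch = some (((p >>> (6 - (ch.toNat - 97))) &&& 1) ^^^ 1) := by
      simp [pvCharValB, hc1, hc2]
    set cv : Nat := ((p >>> (6 - (ch.toNat - 97))) &&& 1) ^^^ 1 with hcvdef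
    have hcvle : cv ≤ 1 := by
      have : (p >>> (6 - (ch.toNat - 97))) &&& 1 ≤ 1 := Nat.and_le_right
      exact pv_xor_le_one this (le_refl 1)
    have hmb : (pvMaskOf (ch.toNat - 97)).testBit p = (cv == 1) :=
      pvMaskOf_testBit ⟨ch.toNat - 97, hk⟩ ⟨p, hp⟩
    have hstep : (t &&& pvMaskOf (ch.toNat - 97)).testBit p = ((w &&& cv) == 1) := by
      rw [Nat.testBit_land, hrel, hmb, pv_and_eq_one hw hcvle]
    have hlt : t &&& pvMaskOf (ch.toNat - 97) < 2 ^ 128 :=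
      lt_of_le_of_lt Nat.and_le_left ht
    have hwle : w &&& cv ≤ 1 := le_trans Nat.and_le_left hw
    have := ih (fun c hc => hall c (List.mem_cons_of_mem _ hc))
      (t &&& pvMaskOf (ch.toNat - 97)) (w &&& cv) hlt hwle hstep
    simpa [List.foldl_cons, hmask, pvTermAccB, hcv] using this

-- outer loop relation at one fixed position p
theorem pvFold_rel (p : Nat) (hp : p < 128) :
    ∀ (terms : List String),
    (∀ term ∈ terms, term.toList = ['0'] ∨ term.toList = ['1'] ∨
      ∀ ch ∈ term.toList, 97 ≤ ch.toNat ∧ ch.toNat ≤ 103) →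
    ∀ (cw bit : Nat), cw < 2 ^ 128 → bit ≤ 1 → cw.testBit p = (bit == 1) →
    (terms.foldl pvStepA cw) < 2 ^ 128 ∧ (terms.foldl (pvBitStepB p) bit) ≤ 1 ∧
    (terms.foldl pvStepA cw).testBit p = ((terms.foldl (pvBitStepB p) bit) == 1) := by
  intro terms
  induction terms with
  | nil => intro _ cw bit h1 h2 h3; exact ⟨h1, h2, h3⟩
  | cons term rest ih =>
    intro hpre cw bit h1 h2 h3
    have hpre' := fun t ht => hpre t (List.mem_cons_of_mem _ ht)
    have hterm := hpre term (List.mem_cons_self ..)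
    have key : (pvStepA cw term) < 2 ^ 128 ∧ (pvBitStepB p bit term) ≤ 1 ∧
        (pvStepA cw term).testBit p = ((pvBitStepB p bit term) == 1) := by
      by_cases h0 : term.toList.length = 0
      · have : term.toList = [] := List.eq_nil_of_length_eq_zero h0
        simp [pvStepA, pvBitStepB, this]
        exact ⟨h1, h2, h3⟩
      · rcases hterm with hz | ho | hall
        · simp [pvStepA, pvBitStepB, hz, pvZeroC]
          exact ⟨h1, h2, h3⟩
        · have hone : pvOneC.testBit p = true := pvOneC_testBit ⟨p, hp⟩
          have honelt : pvOneC < 2 ^ 128 := by decide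
          have heA : pvStepA cw term = cw ^^^ pvOneC := by
            simp [pvStepA, ho]
          have heB : pvBitStepB p bit term = bit ^^^ 1 := by
            simp [pvBitStepB, ho]
          refine ⟨?_, ?_, ?_⟩
          · rw [heA]; exact Nat.xor_lt_two_pow h1 honelt
          · rw [heB]; exact pv_xor_le_one h2 (le_refl 1)
          · rw [heA, heB]
            exact pv_xor_testbit h2 (le_refl 1) h3 (by simpa using hone)
        · have hne0' : ¬(term.toList = ['0']) := by
            intro h
            have := hall '0' (by simp [h])
            simp at this
          have hne1' : ¬(term.toList = ['1']) := by
            intro h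
            have := hall '1' (by simp [h])
            simp at this
          have honelt : pvOneC < 2 ^ 128 := by decide
          have hstart : pvOneC.testBit p = ((1:Nat) == 1) := by
            simpa using pvOneC_testBit ⟨p, hp⟩
          obtain ⟨tA, tB, hA0, hB0, htA, htB, hrel⟩ :=
            pvTerm_rel p hp term.toList hall pvOneC 1 honelt (le_refl 1) hstart
          have hA : pvTermValA term.toList = some tA := hA0
          have hB : pvTermValB p term.toList = some tB := hB0
          have heA : pvStepA cw term = cw ^^^ tA := pvStepA_big term cw h0 hne0' hne1' hA
          have heB : pvBitStepB p bit term = bit ^^^ tB := pvBitStepB_big p term bit h0 hne0' hne1' hB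
          refine ⟨?_, ?_, ?_⟩
          · rw [heA]; exact Nat.xor_lt_two_pow h1 htA
          · rw [heB]; exact pv_xor_le_one h2 htB
          · rw [heA, heB]; exact pv_xor_testbit h2 htB h3 hrel
    exact ih hpre' _ _ key.1 key.2.1 key.2.2

theorem pvTermAccB_none (p : Nat) : ∀ (s : List Char), s.foldl (pvTermAccB p) none = none := by
  intro s; induction s with
  | nil => rfl
  | cons ch rest ih => simpa [pvTermAccB] using ih

theorem pvTermValB_le_one (p : Nat) :
    ∀ (s : List Char) (v : Nat), v ≤ 1 →
    ∀ tB, s.foldl (pvTermAccB p) (some v) = some tB → tB ≤ 1 := by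
  intro s
  induction s with
  | nil => intro v hv tB h; cases h; exact hv
  | cons ch rest ih =>
    intro v hv tB h
    simp only [List.foldl_cons, pvTermAccB] at h
    cases hc : pvCharValB p ch with
    | none => rw [hc] at h; rw [pvTermAccB_none] at h; cases h
    | some w =>
      rw [hc] at h
      exact ih (v &&& w) (le_trans Nat.and_le_left hv) tB h

theorem pvBitStepB_le_one (p : Nat) (bit : Nat) (term : String) (hb : bit ≤ 1) :
    pvBitStepB p bit term ≤ 1 := by
  unfold pvBitStepB
  split
  · exact hb
  · split
    · simpa using hb
    · split
      · exact pv_xor_le_one hb (le_refl 1)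
      · cases h : pvTermValB p term.toList with
        | none => exact hb
        | some v =>
          exact pv_xor_le_one hb (pvTermValB_le_one p term.toList 1 (le_refl 1) v h)

theorem pvBitB_le_one (terms : List String) (p : Nat) : pvBitB terms p ≤ 1 := by
  unfold pvBitB
  generalize hb : (0:Nat) = bit
  have : bit ≤ 1 := by omega
  clear hb
  induction terms generalizing bit with
  | nil => exact this
  | cons t rest ih => exact ih _ (pvBitStepB_le_one p bit t this)

theorem pv_testBit_zero_of_le_one {bit : Nat} (hb : bit ≤ 1) :
    bit.testBit 0 = (bit == 1) := by
  interval_cases bit <;> decide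

theorem pvPre_forall (terms : List String) (h : Pre_calc_truth_table__7_vars__abc terms) :
    ∀ term ∈ terms, term.toList = ['0'] ∨ term.toList = ['1'] ∨
      ∀ ch ∈ term.toList, 97 ≤ ch.toNat ∧ ch.toNat ≤ 103 := by
  intro term ht
  have h2 := List.all_eq_true.mp h term ht
  simp only [Bool.or_eq_true, beq_iff_eq, List.all_eq_true, Bool.and_eq_true,
    decide_eq_true_eq] at h2
  rcases h2 with (h2 | h2) | h2
  · left; rw [h2]; rfl
  · right; left; rw [h2]; rfl
  · right; right; exact h2

-- B's range loop assembles exactly the bits pvBitB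
theorem pvRange_inv (terms : List String) :
    ∀ n : Nat,
      ((List.range n).foldl (fun cw p => cw ||| (pvBitB terms p <<< p)) 0) < 2 ^ n ∧
      ∀ q : Nat, ((List.range n).foldl (fun cw p => cw ||| (pvBitB terms p <<< p)) 0).testBit q
        = (decide (q < n) && (pvBitB terms q == 1)) := by
  intro n
  induction n with
  | zero => exact ⟨by simp, by intro q; simp⟩
  | succ n ih =>
    obtain ⟨hlt, hbits⟩ := ih
    rw [List.range_succ, List.foldl_append]
    set cw := (List.range n).foldl (fun cw p => cw ||| (pvBitB terms p <<< p)) 0 with hcw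
    have hble : pvBitB terms n ≤ 1 := pvBitB_le_one terms n
    have hshlt : pvBitB terms n <<< n < 2 ^ (n + 1) := by
      rw [Nat.shiftLeft_eq]
      calc pvBitB terms n * 2 ^ n ≤ 1 * 2 ^ n := Nat.mul_le_mul_right _ hble
        _ < 2 ^ (n + 1) := by rw [one_mul]; exact Nat.pow_lt_pow_succ (by omega)
    constructor
    · exact Nat.or_lt_two_pow (lt_of_lt_of_le hlt (Nat.pow_le_pow_right (by omega) (by omega))) hshlt
    · intro q
      simp only [List.foldl_cons, List.foldl_nil, Nat.testBit_or, Nat.testBit_shiftLeft, hbits]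
      rcases lt_trichotomy q n with h | h | h
      · have : ¬ (q ≥ n) := by omega
        simp [h, this, Nat.lt_succ_of_lt h]
      · subst h
        simp [pv_testBit_zero_of_le_one hble]
      · have h1 : ¬ (q < n) := by omega
        have h2 : ¬ (q < n + 1) := by omega
        have h3 : (pvBitB terms n).testBit (q - n) = false := by
          apply Nat.testBit_eq_false_of_lt
          calc pvBitB terms n ≤ 1 := hble
            _ < 2 ^ (q - n) := by
                have : 1 ≤ q - n := by omega
                calc (1:Nat) < 2 ^ 1 := by decide
                  _ ≤ 2 ^ (q - n) := Nat.pow_le_pow_right (by omega) this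
        simp [h1, h2, h3]

-- ===== VERDICT (by name: the statement is the Claim_ definition above) =====
theorem calc_truth_table__7_vars__abc_spec : Claim_equal_calc_truth_table__7_vars__abc := by
  intro terms _ hpre0
  have hpre := pvPre_forall terms hpre0
  have h0lt : (0:Nat) < 2 ^ 128 := Nat.two_pow_pos 128
  have hzb : ∀ i : Nat, (0:Nat).testBit i = ((0:Nat) == 1) := by intro i; simp
  have hA128 : terms.foldl pvStepA 0 < 2 ^ 128 :=
    (pvFold_rel 0 (by omega) terms hpre 0 0 h0lt (Nat.zero_le 1) (hzb 0)).1
  obtain ⟨hBlt, hBbits⟩ := pvRange_inv terms 128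
  have key : terms.foldl pvStepA 0
      = (List.range 128).foldl (fun cw p => cw ||| (pvBitB terms p <<< p)) 0 := by
    apply Nat.eq_of_testBit_eq
    intro i
    by_cases hi : i < 128
    · rw [(pvFold_rel i hi terms hpre 0 0 h0lt (Nat.zero_le 1) (hzb i)).2.2, hBbits i]
      simp [hi, pvBitB]
    · have hle : (2:Nat) ^ 128 ≤ 2 ^ i := Nat.pow_le_pow_right (by omega) (by omega)
      rw [Nat.testBit_eq_false_of_lt (lt_of_lt_of_le hA128 hle),
          Nat.testBit_eq_false_of_lt (lt_of_lt_of_le hBlt hle)]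
  unfold Spec_calc_truth_table__7_vars__abc calc_truth_table__7_vars__abc
    calc_truth_table__7_vars__abc_alt
  rw [key]
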